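-- pv_equiv track=rewrite | github.com/Mriris/HeteroCD-GOLD | datasets/preprocess.py | is_acceptable_size_difference
-- ===== SOURCE A (Python) =====
-- def is_acceptable_size_difference(sizes, tolerance=2):
--     """
--     检查尺寸差异是否在可接受范围内
--
--     参数:
--         sizes: 尺寸列表
--         tolerance: 允许的像素差异阈值
--
--     返回:
--         是否可接受
--     """
--     max_width = max(w for w, h in sizes)
--     min_width = min(w for w, h in sizes)
--     max_height = max(h for w, h in sizes)
--     min_height = min(h for w, h in sizes)
--
--     width_diff = max_width - min_width
--     height_diff = max_height - min_height
--
--     return width_diff <= tolerance and height_diff <= tolerance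
-- ===== SOURCE B (Python) =====
-- def is_acceptable_size_difference(sizes, tolerance=2):
--     """Sort the widths and the heights; the range of each is last - first
--     of its sorted list, compared against the tolerance."""
--     ws = sorted(w for w, h in sizes)
--     hs = sorted(h for w, h in sizes)
--     return ws[-1] - ws[0] <= tolerance and hs[-1] - hs[0] <= tolerance
-- ===== Notes on version B (the rewrite author's own statement) =====
-- stated objective: alternative
-- what changed: Replaced the four min/max scans with a sort-then-endpoints strategy: sort the widths and the heights once each and read the range as last element minus first element of each sorted list; Pre_ excludes the empty list, on which both programs raise.
import Mathlib
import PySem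

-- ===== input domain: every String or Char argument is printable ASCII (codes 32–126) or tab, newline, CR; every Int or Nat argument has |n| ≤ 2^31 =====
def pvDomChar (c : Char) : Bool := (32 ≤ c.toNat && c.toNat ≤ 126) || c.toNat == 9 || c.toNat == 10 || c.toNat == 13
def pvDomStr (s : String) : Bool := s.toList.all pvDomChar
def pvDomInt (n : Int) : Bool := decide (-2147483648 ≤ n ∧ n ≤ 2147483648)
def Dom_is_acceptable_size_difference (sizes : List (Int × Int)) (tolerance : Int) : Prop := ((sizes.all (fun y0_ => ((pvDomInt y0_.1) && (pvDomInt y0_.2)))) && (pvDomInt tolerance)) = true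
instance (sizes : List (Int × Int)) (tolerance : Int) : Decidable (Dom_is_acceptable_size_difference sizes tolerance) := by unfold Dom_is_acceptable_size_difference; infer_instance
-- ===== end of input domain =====

-- B replaces A's four min/max scans by sorting the widths and the heights and reading each range off the sorted lists' endpoints (alternative strategy, not faster); Pre_ excludes the empty list, on which both Pythons raise.
-- ===== PORT A =====
def is_acceptable_size_difference (sizes : List (Int × Int)) (tolerance : Int) : Bool :=
  match PySem.List.max? (sizes.map (fun p => p.1)) (fun y => y),
        PySem.List.min? (sizes.map (fun p => p.1)) (fun y => y),
        PySem.List.max? (sizes.map (fun p => p.2)) (fun y => y),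
        PySem.List.min? (sizes.map (fun p => p.2)) (fun y => y) with
  | some max_width, some min_width, some max_height, some min_height =>
      decide (max_width - min_width ≤ tolerance) && decide (max_height - min_height ≤ tolerance)
  | _, _, _, _ => false  -- empty sizes: Python's max() raises ValueError; excluded by Pre_

-- ===== PORT B =====
def is_acceptable_size_difference_alt (sizes : List (Int × Int)) (tolerance : Int) : Bool :=
  let ws := PySem.List.sorted (sizes.map (fun p => p.1)) (fun x => x) false
  let hs := PySem.List.sorted (sizes.map (fun p => p.2)) (fun x => x) false
  match PySem.List.pyGet? ws (-1) with
  | none => false  -- empty sizes: Python B's ws[-1] raises IndexError; excluded by Pre_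
  | some wlast =>
    match PySem.List.pyGet? ws 0 with
    | none => false
    | some wfirst =>
      match PySem.List.pyGet? hs (-1) with
      | none => false
      | some hlast =>
        match PySem.List.pyGet? hs 0 with
        | none => false
        | some hfirst =>
          decide (wlast - wfirst ≤ tolerance) && decide (hlast - hfirst ≤ tolerance)

-- ===== PRECONDITION & SPEC =====
-- Pre_ excludes exactly the empty list, on which A raises ValueError (max() of empty sequence).
def Pre_is_acceptable_size_difference (sizes : List (Int × Int)) (tolerance : Int) : Prop := sizes ≠ []
instance (sizes : List (Int × Int)) (tolerance : Int) : Decidable (Pre_is_acceptable_size_difference sizes tolerance) := by unfold Pre_is_acceptable_size_difference; infer_instance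
def pvWitness_is_acceptable_size_difference : (List (Int × Int)) × Int := ([(10, 12), (11, 10)], 2)

def Spec_is_acceptable_size_difference (sizes : List (Int × Int)) (tolerance : Int) (out : Bool) : Prop := out = is_acceptable_size_difference_alt sizes tolerance
instance (sizes : List (Int × Int)) (tolerance : Int) (out : Bool) : Decidable (Spec_is_acceptable_size_difference sizes tolerance out) := by unfold Spec_is_acceptable_size_difference; infer_instance

-- ===== CLAIM =====
def Claim_equal_is_acceptable_size_difference : Prop := ∀ (sizes : List (Int × Int)) (tolerance : Int), Dom_is_acceptable_size_difference sizes tolerance → Pre_is_acceptable_size_difference sizes tolerance → Spec_is_acceptable_size_difference sizes tolerance (is_acceptable_size_difference sizes tolerance)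

-- ===== LEMMAS AND PROOFS =====
-- In a ≤-sorted list every element is at most the last element.
theorem pairwise_le_getLast (l : List Int) (h : l.Pairwise (· ≤ ·)) (hne : l ≠ []) :
    ∀ y ∈ l, y ≤ l.getLast hne := by
  induction l with
  | nil => simp
  | cons a t ih =>
    intro y hy
    cases t with
    | nil => simp at hy; simp [hy, List.getLast]
    | cons b u =>
      rw [List.getLast_cons (by simp)]
      rcases List.mem_cons.mp hy with rfl | hyt
      · exact le_trans (List.rel_of_pairwise_cons h (List.getLast_mem _))
          (le_refl _)
      · exact ih h.tail (by simp) y hyt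

-- The endpoints of the sorted list are exactly min?/max? of the original list.
theorem sorted_endpoints (l : List Int) (hne : l ≠ []) :
    ∃ M m, PySem.List.max? l (fun y => y) = some M ∧ PySem.List.min? l (fun y => y) = some m ∧
      (PySem.List.sorted l (fun x => x) false).getLast? = some M ∧
      (PySem.List.sorted l (fun x => x) false)[0]? = some m := by
  obtain ⟨M, hM⟩ : ∃ M, PySem.List.max? l (fun y => y) = some M := by
    cases hmx : PySem.List.max? l (fun y => y) with
    | none => exact absurd ((PySem.List.max?_eq_none_iff _ _).mp hmx) hne
    | some M => exact ⟨M, rfl⟩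
  obtain ⟨m, hm⟩ : ∃ m, PySem.List.min? l (fun y => y) = some m := by
    cases hmn : PySem.List.min? l (fun y => y) with
    | none => exact absurd ((PySem.List.min?_eq_none_iff _ _).mp hmn) hne
    | some m => exact ⟨m, rfl⟩
  set s := PySem.List.sorted l (fun x => x) false with hs
  have hperm : s.Perm l := PySem.List.sorted_perm l _ _
  have hsne : s ≠ [] := by
    intro h0; rw [h0] at hperm; exact hne hperm.symm.eq_nil
  obtain ⟨a, t, hat⟩ := List.exists_cons_of_ne_nil hsne
  have hpw : s.Pairwise (fun x y : Int => x ≤ y) := PySem.List.sorted_pairwise l _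
  refine ⟨M, m, hM, hm, ?_, ?_⟩
  · -- getLast? = some M
    have hlast_mem : s.getLast hsne ∈ l := hperm.mem_iff.mp (List.getLast_mem hsne)
    have h1 : s.getLast hsne ≤ M := PySem.List.max?_isMax hM _ hlast_mem
    have hMs : M ∈ s := hperm.mem_iff.mpr (PySem.List.max?_mem hM)
    have h2 : M ≤ s.getLast hsne := pairwise_le_getLast s hpw hsne M hMs
    rw [List.getLast?_eq_some_getLast hsne]
    exact congrArg some (le_antisymm h1 h2)
  · -- head = some m
    have hhead : ∀ y ∈ l, a ≤ y := PySem.List.key_head_sorted_le (xs := l) (key := fun x => x) hat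
    have hams : a ∈ s := hat ▸ List.mem_cons_self
    have haml : a ∈ l := hperm.mem_iff.mp hams
    have h1 : m ≤ a := PySem.List.min?_isMin hm _ haml
    have h2 : a ≤ m := hhead m (PySem.List.min?_mem hm)
    rw [hat]
    simpa using le_antisymm h2 h1

-- ===== VERDICT =====
theorem is_acceptable_size_difference_spec : Claim_equal_is_acceptable_size_difference := by
  intro sizes tolerance _ hpre
  have hws : sizes.map (fun p : Int × Int => p.1) ≠ [] := by
    simpa using hpre
  have hhs : sizes.map (fun p : Int × Int => p.2) ≠ [] := by
    simpa using hpre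
  obtain ⟨Mw, mw, hMw, hmw, hlw, hfw⟩ := sorted_endpoints _ hws
  obtain ⟨Mh, mh, hMh, hmh, hlh, hfh⟩ := sorted_endpoints _ hhs
  unfold Spec_is_acceptable_size_difference is_acceptable_size_difference is_acceptable_size_difference_alt
  rw [hMw, hmw, hMh, hmh]
  simp only [PySem.List.pyGet?_neg_one, PySem.List.pyGet?_zero, List.getLast?_eq_getElem?]
  rw [List.getLast?_eq_getElem?] at hlw hlh
  rw [hlw, hfw, hlh, hfh]
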